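-- pv_equiv track=rewrite | github.com/Chakrapani2122/DSM | test.py | solve
-- ===== SOURCE A (Python) =====
-- def solve(A):
--     n = len(A)
--     mod = 10**3 + 7
--     pre = [0] * n
--     suf = [0] * n
--     pre[0] = A[0]
--     suf[n-1] = A[n-1]
--     for i in range(1, n):
--         pre[i] = pre[i-1] + A[i]
--     for i in range(n-2, -1, -1):
--         suf[i] = suf[i+1] + A[i]
--     ans = 0
--     for i in range(1, n-1):
--         ans = max(ans, pre[i-1] * suf[i+1])
--     return ans % mod
-- ===== SOURCE B (Python) =====
-- def solve(A):
--     mod = 10**3 + 7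
--     total = sum(A)
--     ans = 0
--     left = 0
--     for i in range(1, len(A) - 1):
--         left += A[i - 1]
--         ans = max(ans, left * (total - left - A[i]))
--     return ans % mod
-- ===== Notes on version B (the rewrite author's own statement) =====
-- stated objective: simpler
-- what changed: Replaces the two precomputed prefix/suffix arrays and three loops by a single loop maintaining one running scalar left sum and deriving the right sum by subtraction from the precomputed total.
import Mathlib
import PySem

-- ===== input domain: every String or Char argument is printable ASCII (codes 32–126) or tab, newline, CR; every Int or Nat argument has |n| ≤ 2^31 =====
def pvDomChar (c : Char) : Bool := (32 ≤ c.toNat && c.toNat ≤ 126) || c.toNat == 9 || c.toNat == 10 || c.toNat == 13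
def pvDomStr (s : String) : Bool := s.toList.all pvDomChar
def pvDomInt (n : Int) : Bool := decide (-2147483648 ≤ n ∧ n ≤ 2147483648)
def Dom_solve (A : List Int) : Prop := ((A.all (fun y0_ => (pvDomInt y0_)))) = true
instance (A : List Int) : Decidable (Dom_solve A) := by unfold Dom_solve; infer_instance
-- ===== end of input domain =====

-- B replaces A's two prefix/suffix arrays and three loops by one loop over two scalars
-- (a running left sum; the right sum derived as total - left - A[i]); objective: simpler.

-- ===== PORT A =====
def solve (A : List Int) : Int :=
  let n : Int := A.length
  let md : Int := 1007
  let pre : List Int := List.replicate A.length 0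
  let suf : List Int := List.replicate A.length 0
  let pre := PySem.List.pySetD pre 0 (PySem.List.pyGetD A 0 0)
  let suf := PySem.List.pySetD suf (n - 1) (PySem.List.pyGetD A (n - 1) 0)
  let pre := (PySem.List.pyRange 1 n 1).foldl
      (fun pre i => PySem.List.pySetD pre i
        (PySem.List.pyGetD pre (i - 1) 0 + PySem.List.pyGetD A i 0)) pre
  let suf := (PySem.List.pyRange (n - 2) (-1) (-1)).foldl
      (fun suf i => PySem.List.pySetD suf i
        (PySem.List.pyGetD suf (i + 1) 0 + PySem.List.pyGetD A i 0)) suf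
  let ans := (PySem.List.pyRange 1 (n - 1) 1).foldl
      (fun ans i => max ans (PySem.List.pyGetD pre (i - 1) 0 * PySem.List.pyGetD suf (i + 1) 0)) 0
  PySem.Int.mod ans md

-- ===== PORT B =====
def solve_alt (A : List Int) : Int :=
  let md : Int := 1007
  let total : Int := A.sum
  let st := (PySem.List.pyRange 1 ((A.length : Int) - 1) 1).foldl
      (fun (s : Int × Int) i =>
        let left := s.2 + PySem.List.pyGetD A (i - 1) 0
        (max s.1 (left * (total - left - PySem.List.pyGetD A i 0)), left)) (0, 0)
  PySem.Int.mod st.1 md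

-- ===== PRECONDITION & SPEC =====
-- A unconditionally indexes the first and last elements, so it raises IndexError exactly on the empty list (B, needing no arrays, would return 0 there).
def Pre_solve (A : List Int) : Prop := A ≠ []
instance (A : List Int) : Decidable (Pre_solve A) := by unfold Pre_solve; infer_instance
def pvWitness_solve : List Int := ([1, 2, 3, 4])

def Spec_solve (A : List Int) (out : Int) : Prop := out = solve_alt A
instance (A : List Int) (out : Int) : Decidable (Spec_solve A out) := by unfold Spec_solve; infer_instance

-- ===== CLAIM (what is proved, stated in full; the proofs are below) =====
def Claim_equal_solve : Prop := ∀ (A : List Int), Dom_solve A → Pre_solve A → Spec_solve A (solve A)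

-- ===== LEMMAS AND PROOFS =====

-- sum split around index i: A.sum = (take i).sum + A[i] + (drop (i+1)).sum
theorem pvSumSplit (A : List Int) (i : Nat) (h : i < A.length) :
    A.sum = (A.take i).sum + A.getD i 0 + (A.drop (i + 1)).sum := by
  have h1 := List.sum_take_add_sum_drop A i
  rw [List.drop_eq_getElem_cons h] at h1
  simp only [List.sum_cons] at h1
  rw [List.getD_eq_getElem A 0 h]
  omega

theorem pvTakeSucc (A : List Int) (i : Nat) (h : i < A.length) :
    (A.take (i + 1)).sum = (A.take i).sum + A.getD i 0 := by
  rw [List.getD_eq_getElem A 0 h, List.sum_take_succ]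

-- getD after set
theorem pvGetDSet (L : List Int) (m j : Nat) (v : Int) (h : m < L.length) :
    (L.set m v).getD j 0 = if j = m then v else L.getD j 0 := by
  by_cases hj : j < L.length
  · rw [List.getD_eq_getElem _ 0 (by simpa using hj), List.getElem_set]
    split_ifs with h1 h2 h2 <;> try rfl
    · omega
    · omega
    · rw [List.getD_eq_getElem _ 0 hj]
  · rw [if_neg (by omega), List.getD_eq_default _ 0 (by simpa using hj),
      List.getD_eq_default _ 0 (by omega)]

-- invariant for A's first (prefix-sum) loop
theorem pvPreInv (A : List Int) : ∀ (k m : Nat) (L : List Int),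
    A.length - m = k → L.length = A.length → 1 ≤ m →
    (∀ j : Nat, j < m → j < A.length → L.getD j 0 = (A.take (j + 1)).sum) →
    ((PySem.List.pyRange (m : Int) (A.length : Int) 1).foldl
      (fun pre i => PySem.List.pySetD pre i
        (PySem.List.pyGetD pre (i - 1) 0 + PySem.List.pyGetD A i 0)) L).length = A.length ∧
    ∀ j : Nat, j < A.length →
      ((PySem.List.pyRange (m : Int) (A.length : Int) 1).foldl
        (fun pre i => PySem.List.pySetD pre i
          (PySem.List.pyGetD pre (i - 1) 0 + PySem.List.pyGetD A i 0)) L).getD j 0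
        = (A.take (j + 1)).sum := by
  intro k
  induction k with
  | zero =>
    intro m L hk hL hm hinv
    rw [PySem.List.pyRange_one_eq_nil (by exact_mod_cast (by omega : A.length ≤ m))]
    exact ⟨hL, fun j hj => hinv j (by omega) hj⟩
  | succ k ih =>
    intro m L hk hL hm hinv
    have hm2 : m < A.length := by omega
    rw [PySem.List.pyRange_one_cons (by exact_mod_cast hm2)]
    simp only [List.foldl_cons]
    have e1 : (m : Int) - 1 = ((m - 1 : Nat) : Int) := by omega
    have hval : PySem.List.pyGetD L ((m : Int) - 1) 0 + PySem.List.pyGetD A (m : Int) 0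
        = (A.take (m + 1)).sum := by
      rw [e1, PySem.List.pyGetD_natCast, PySem.List.pyGetD_natCast,
        hinv (m - 1) (by omega) (by omega), show m - 1 + 1 = m from by omega,
        pvTakeSucc A m hm2]
    rw [hval, PySem.List.pySetD_natCast]
    have e2 : (m : Int) + 1 = ((m + 1 : Nat) : Int) := by push_cast; ring
    rw [e2]
    refine ih (m + 1) (L.set m _) (by omega) (by simpa using hL) (by omega) ?_
    intro j hj hjA
    rw [pvGetDSet _ _ _ _ (by omega)]
    split_ifs with he
    · rw [he]
    · exact hinv j (by omega) hjA

-- invariant for A's second (suffix-sum) loop, counting down from a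
theorem pvSufInv (A : List Int) : ∀ (k : Nat) (a : Int) (L : List Int),
    (a + 1).toNat = k → L.length = A.length → a ≤ (A.length : Int) - 2 → -1 ≤ a →
    (∀ j : Nat, a < (j : Int) → j < A.length → L.getD j 0 = (A.drop j).sum) →
    ((PySem.List.pyRange a (-1) (-1)).foldl
      (fun suf i => PySem.List.pySetD suf i
        (PySem.List.pyGetD suf (i + 1) 0 + PySem.List.pyGetD A i 0)) L).length = A.length ∧
    ∀ j : Nat, j < A.length →
      ((PySem.List.pyRange a (-1) (-1)).foldl
        (fun suf i => PySem.List.pySetD suf i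
          (PySem.List.pyGetD suf (i + 1) 0 + PySem.List.pyGetD A i 0)) L).getD j 0
        = (A.drop j).sum := by
  intro k
  induction k with
  | zero =>
    intro a L hk hL ha ha2 hinv
    have ha3 : a = -1 := by omega
    rw [ha3, PySem.List.pyRange_neg_one_eq_nil (by omega)]
    refine ⟨hL, fun j hj => hinv j (by omega) hj⟩
  | succ k ih =>
    intro a L hk hL ha ha2 hinv
    obtain ⟨b, rfl⟩ : ∃ b : Nat, a = (b : Int) := ⟨a.toNat, by omega⟩
    rw [PySem.List.pyRange_neg_one_cons (by omega)]
    simp only [List.foldl_cons]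
    have hlt : b + 1 < A.length := by omega
    have hval : PySem.List.pyGetD L ((b : Int) + 1) 0 + PySem.List.pyGetD A (b : Int) 0
        = (A.drop b).sum := by
      rw [show (b : Int) + 1 = ((b + 1 : Nat) : Int) by push_cast; ring,
        PySem.List.pyGetD_natCast, PySem.List.pyGetD_natCast,
        hinv (b + 1) (by omega) hlt,
        List.drop_eq_getElem_cons (by omega : b < A.length),
        List.getD_eq_getElem A 0 (by omega : b < A.length)]
      simp only [List.sum_cons]
      ring
    rw [hval, PySem.List.pySetD_natCast]
    refine ih ((b : Int) - 1) (L.set b _) (by omega) (by simpa using hL) (by omega) (by omega) ?_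
    intro j hj hjA
    rw [pvGetDSet _ _ _ _ (by omega)]
    split_ifs with he
    · rw [he]
    · exact hinv j (by omega) hjA

-- B's fold with pair state equals the plain max-fold over the same range
theorem pvBFold (A : List Int) : ∀ (k : Nat) (a : Int) (s : Int × Int),
    ((A.length : Int) - 1 - a).toNat = k → 1 ≤ a →
    s.2 = (A.take (a - 1).toNat).sum →
    ((PySem.List.pyRange a ((A.length : Int) - 1) 1).foldl
      (fun (s : Int × Int) i =>
        let left := s.2 + PySem.List.pyGetD A (i - 1) 0
        (max s.1 (left * (A.sum - left - PySem.List.pyGetD A i 0)), left)) s).1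
    = (PySem.List.pyRange a ((A.length : Int) - 1) 1).foldl
        (fun ans i => max ans ((A.take i.toNat).sum * (A.drop (i.toNat + 1)).sum)) s.1 := by
  intro k
  induction k with
  | zero =>
    intro a s hk ha hleft
    rw [PySem.List.pyRange_one_eq_nil (by omega)]
    rfl
  | succ k ih =>
    intro a s hk ha hleft
    obtain ⟨b, rfl⟩ : ∃ b : Nat, a = (b : Int) := ⟨a.toNat, by omega⟩
    have hb1 : 1 ≤ b := by omega
    have haA : b < A.length := by omega
    rw [PySem.List.pyRange_one_cons (by omega)]
    simp only [List.foldl_cons, Int.toNat_natCast]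
    rw [show ((b : Int) - 1).toNat = b - 1 from by omega] at hleft
    have hleft' : s.2 + PySem.List.pyGetD A ((b : Int) - 1) 0 = (A.take b).sum := by
      rw [show (b : Int) - 1 = ((b - 1 : Nat) : Int) from by omega,
        PySem.List.pyGetD_natCast, hleft, ← pvTakeSucc A (b - 1) (by omega),
        show b - 1 + 1 = b from by omega]
    have hright : A.sum - (A.take b).sum - PySem.List.pyGetD A (b : Int) 0
        = (A.drop (b + 1)).sum := by
      rw [PySem.List.pyGetD_natCast]
      have := pvSumSplit A b haA
      omega
    rw [ih ((b : Int) + 1) _ (by omega) (by omega)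
      (by simp only [show (b : Int) + 1 - 1 = (b : Int) from by ring, Int.toNat_natCast]
          exact hleft')]
    simp only [hleft', hright]

-- the ans-loop of A, read through the computed pre/suf lists, is the plain max-fold
theorem pvAnsCong (A : List Int) (preL sufL : List Int) (z : Int)
    (hpre : ∀ j : Nat, j < A.length → preL.getD j 0 = (A.take (j + 1)).sum)
    (hsuf : ∀ j : Nat, j < A.length → sufL.getD j 0 = (A.drop j).sum) :
    (PySem.List.pyRange 1 ((A.length : Int) - 1) 1).foldl
      (fun ans i => max ans (PySem.List.pyGetD preL (i - 1) 0 * PySem.List.pyGetD sufL (i + 1) 0)) z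
    = (PySem.List.pyRange 1 ((A.length : Int) - 1) 1).foldl
      (fun ans i => max ans ((A.take i.toNat).sum * (A.drop (i.toNat + 1)).sum)) z := by
  apply PySem.List.foldl_congr_mem
  intro acc i hi
  rw [PySem.List.mem_pyRange_one] at hi
  obtain ⟨b, rfl⟩ : ∃ b : Nat, i = (b : Int) := ⟨i.toNat, by omega⟩
  have hb1 : 1 ≤ b := by omega
  have hbA : b < A.length := by omega
  rw [show (b : Int) - 1 = ((b - 1 : Nat) : Int) from by omega, PySem.List.pyGetD_natCast,
    show (b : Int) + 1 = ((b + 1 : Nat) : Int) from by omega, PySem.List.pyGetD_natCast,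
    hpre (b - 1) (by omega), hsuf (b + 1) (by omega),
    show b - 1 + 1 = b from by omega]
  simp only [Int.toNat_natCast]

theorem pvMain (A : List Int) (hA : A ≠ []) : solve A = solve_alt A := by
  have hn : 1 ≤ A.length := List.length_pos_of_ne_nil hA
  unfold solve solve_alt
  simp only []
  -- prefix list facts
  have h1 := pvPreInv A (A.length - 1) 1
      (PySem.List.pySetD (List.replicate A.length 0) 0 (PySem.List.pyGetD A 0 0))
      (by omega)
      (by simp [PySem.List.length_pySetD])
      le_rfl
      (by
        intro j hj hjA
        interval_cases j
        rw [PySem.List.pySetD_of_nonneg _ _ (by norm_num)]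
        simp only [Int.toNat_zero]
        rw [pvGetDSet _ _ _ _ (by simpa using hn), if_pos rfl, PySem.List.pyGetD_zero,
          pvTakeSucc A 0 hn]
        simp)
  simp only [Nat.cast_one] at h1
  -- suffix list facts
  have h2 := pvSufInv A ((A.length : Int) - 2 + 1).toNat ((A.length : Int) - 2)
      (PySem.List.pySetD (List.replicate A.length 0) ((A.length : Int) - 1)
        (PySem.List.pyGetD A ((A.length : Int) - 1) 0))
      rfl
      (by simp [PySem.List.length_pySetD])
      le_rfl
      (by omega)
      (by
        intro j hj hjA
        have hj' : j = A.length - 1 := by omega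
        subst hj'
        rw [show ((A.length : Int) - 1) = ((A.length - 1 : Nat) : Int) from by omega,
          PySem.List.pySetD_natCast, PySem.List.pyGetD_natCast,
          pvGetDSet _ _ _ _ (by simp; omega), if_pos rfl,
          List.drop_eq_getElem_cons (by omega : A.length - 1 < A.length),
          List.getD_eq_getElem A 0 (by omega : A.length - 1 < A.length)]
        simp [List.drop_eq_nil_of_le (by omega : A.length ≤ A.length - 1 + 1)])
  -- rewrite A's ans loop, then B's loop, to the same plain fold
  rw [pvAnsCong A _ _ 0 h1.2 h2.2,
    pvBFold A ((A.length : Int) - 1 - 1).toNat 1 (0, 0) rfl le_rfl (by norm_num)]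

-- ===== VERDICT (by name: the statement is the Claim_ definition above) =====
theorem solve_spec : Claim_equal_solve := by
  intro A _ hpre
  exact pvMain A hpre
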